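-- pv_equiv track=rewrite | github.com/adamvest/keypoint-baseline | demo/predictor.py | compute_boxes_from_points
-- ===== SOURCE A (Python) =====
-- def compute_boxes_from_points(vector_masks):
--     boxes = []
--
--     for points in vector_masks:
--         x = [pt[0] for pt in points]
--         y = [pt[1] for pt in points]
--         x_min, x_max = min(x), max(x)
--         y_min, y_max = min(y), max(y)
--         w, h = x_max - x_min, y_max - y_min
--         boxes.append([x_min, y_min, w, h])
--
--     return boxes
-- ===== SOURCE B (Python) =====
-- def compute_boxes_from_points(vector_masks):
--     boxes = []
--     for points in vector_masks:
--         x_min, y_min = points[0]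
--         x_max, y_max = x_min, y_min
--         for px, py in points[1:]:
--             if px < x_min:
--                 x_min = px
--             if px > x_max:
--                 x_max = px
--             if py < y_min:
--                 y_min = py
--             if py > y_max:
--                 y_max = py
--         boxes.append([x_min, y_min, x_max - x_min, y_max - y_min])
--     return boxes
-- ===== Notes on version B (the rewrite author's own statement) =====
-- stated objective: alternative
-- what changed: Replaces the two coordinate-projection comprehensions plus four separate min/max scans per point set with one fused pass maintaining four running accumulators initialized from the first point.
import Mathlib
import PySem

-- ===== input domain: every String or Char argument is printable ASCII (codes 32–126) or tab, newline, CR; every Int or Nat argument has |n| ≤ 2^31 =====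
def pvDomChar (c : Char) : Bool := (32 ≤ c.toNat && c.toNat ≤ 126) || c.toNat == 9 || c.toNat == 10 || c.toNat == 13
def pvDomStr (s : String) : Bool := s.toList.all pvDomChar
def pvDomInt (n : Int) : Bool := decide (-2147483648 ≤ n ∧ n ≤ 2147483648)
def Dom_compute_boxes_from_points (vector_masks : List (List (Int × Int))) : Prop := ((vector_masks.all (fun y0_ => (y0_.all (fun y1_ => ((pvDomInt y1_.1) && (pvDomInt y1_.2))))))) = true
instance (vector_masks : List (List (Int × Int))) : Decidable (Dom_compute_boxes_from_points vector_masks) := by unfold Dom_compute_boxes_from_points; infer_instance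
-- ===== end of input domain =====

-- B fuses the two projection comprehensions and four min/max scans of A into one
-- single pass per point set with four running accumulators (objective: alternative, same cost).

-- ===== PORT A =====
-- min()/max() on an empty list raise ValueError in Python; Pre_ excludes empty point
-- sets, so the .getD 0 default is never reached on admitted inputs.
def compute_boxes_from_points (vector_masks : List (List (Int × Int))) : List (List Int) :=
  vector_masks.foldl (fun boxes points =>
    let x := points.map (fun pt => pt.1)
    let y := points.map (fun pt => pt.2)
    let x_min := (PySem.List.min? x (fun v => v)).getD 0
    let x_max := (PySem.List.max? x (fun v => v)).getD 0
    let y_min := (PySem.List.min? y (fun v => v)).getD 0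
    let y_max := (PySem.List.max? y (fun v => v)).getD 0
    boxes ++ [[x_min, y_min, x_max - x_min, y_max - y_min]]) []

-- ===== PORT B =====
-- the inner 'for px, py in points[1:]' loop of Source B, same four if-updates
def fuseLoop (t : List (Int × Int)) (x_min x_max y_min y_max : Int) : Int × Int × Int × Int :=
  match t with
  | [] => (x_min, x_max, y_min, y_max)
  | (px, py) :: r =>
      fuseLoop r (if px < x_min then px else x_min) (if px > x_max then px else x_max)
                 (if py < y_min then py else y_min) (if py > y_max then py else y_max)

-- points[0] raises IndexError on an empty point set in Source B; the [] branch is outside Pre_.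
def compute_boxes_from_points_alt (vector_masks : List (List (Int × Int))) : List (List Int) :=
  vector_masks.foldl (fun boxes points =>
    match points with
    | [] => boxes ++ [[]]
    | (x1, y1) :: t =>
        let s := fuseLoop t x1 x1 y1 y1
        boxes ++ [[s.1, s.2.2.1, s.2.1 - s.1, s.2.2.2 - s.2.2.1]]) []

-- ===== PRECONDITION & SPEC =====
-- Pre_ excludes inputs containing an empty point set: there A raises ValueError (min of
-- empty sequence) and B raises IndexError, so neither returns a value.
def Pre_compute_boxes_from_points (vector_masks : List (List (Int × Int))) : Prop :=
  ∀ points ∈ vector_masks, points ≠ []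
instance (vector_masks : List (List (Int × Int))) : Decidable (Pre_compute_boxes_from_points vector_masks) := by unfold Pre_compute_boxes_from_points; infer_instance
def pvWitness_compute_boxes_from_points : (List (List (Int × Int))) := [[(1, 2), (3, 0), (-5, 7)], [(0, 0)]]

def Spec_compute_boxes_from_points (vector_masks : List (List (Int × Int))) (out : List (List Int)) : Prop := out = compute_boxes_from_points_alt vector_masks
instance (vector_masks : List (List (Int × Int))) (out : List (List Int)) : Decidable (Spec_compute_boxes_from_points vector_masks out) := by unfold Spec_compute_boxes_from_points; infer_instance

-- ===== CLAIM (what is proved, stated in full; the proofs are below) =====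
def Claim_equal_compute_boxes_from_points : Prop := ∀ (vector_masks : List (List (Int × Int))), Dom_compute_boxes_from_points vector_masks → Pre_compute_boxes_from_points vector_masks → Spec_compute_boxes_from_points vector_masks (compute_boxes_from_points vector_masks)

-- ===== LEMMAS AND PROOFS =====

theorem fuseLoop_eq (t : List (Int × Int)) (a b c d : Int) :
    fuseLoop t a b c d =
      (t.foldl (fun m p => min m p.1) a, t.foldl (fun m p => max m p.1) b,
       t.foldl (fun m p => min m p.2) c, t.foldl (fun m p => max m p.2) d) := by
  induction t generalizing a b c d with
  | nil => rfl
  | cons p r ih =>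
      obtain ⟨px, py⟩ := p
      simp only [fuseLoop, List.foldl_cons, ih]
      have e1 : (if px < a then px else a) = min a px := by rw [min_def]; split_ifs <;> omega
      have e2 : (if px > b then px else b) = max b px := by rw [max_def]; split_ifs <;> omega
      have e3 : (if py < c then py else c) = min c py := by rw [min_def]; split_ifs <;> omega
      have e4 : (if py > d then py else d) = max d py := by rw [max_def]; split_ifs <;> omega
      rw [e1, e2, e3, e4]

theorem foldl_append_map {α β : Type} (f : α → β) (l : List α) (acc : List β) :
    l.foldl (fun b p => b ++ [f p]) acc = acc ++ l.map f := by
  induction l generalizing acc with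
  | nil => simp
  | cons x r ih => simp [ih]

def boxA (points : List (Int × Int)) : List Int :=
  [(PySem.List.min? (points.map (fun pt => pt.1)) (fun v => v)).getD 0,
   (PySem.List.min? (points.map (fun pt => pt.2)) (fun v => v)).getD 0,
   (PySem.List.max? (points.map (fun pt => pt.1)) (fun v => v)).getD 0 -
     (PySem.List.min? (points.map (fun pt => pt.1)) (fun v => v)).getD 0,
   (PySem.List.max? (points.map (fun pt => pt.2)) (fun v => v)).getD 0 -
     (PySem.List.min? (points.map (fun pt => pt.2)) (fun v => v)).getD 0]

def boxB (points : List (Int × Int)) : List Int :=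
  match points with
  | [] => []
  | (x1, y1) :: t =>
      let s := fuseLoop t x1 x1 y1 y1
      [s.1, s.2.2.1, s.2.1 - s.1, s.2.2.2 - s.2.2.1]

theorem A_as_map (vm : List (List (Int × Int))) :
    compute_boxes_from_points vm = vm.map boxA := by
  unfold compute_boxes_from_points
  rw [show (fun (boxes : List (List Int)) (points : List (Int × Int)) =>
        let x := points.map (fun pt => pt.1)
        let y := points.map (fun pt => pt.2)
        let x_min := (PySem.List.min? x (fun v => v)).getD 0
        let x_max := (PySem.List.max? x (fun v => v)).getD 0
        let y_min := (PySem.List.min? y (fun v => v)).getD 0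
        let y_max := (PySem.List.max? y (fun v => v)).getD 0
        boxes ++ [[x_min, y_min, x_max - x_min, y_max - y_min]])
      = fun boxes points => boxes ++ [boxA points] from by
        funext boxes points; rfl]
  rw [foldl_append_map]; rfl

theorem B_as_map (vm : List (List (Int × Int))) :
    compute_boxes_from_points_alt vm = vm.map boxB := by
  unfold compute_boxes_from_points_alt
  rw [show (fun (boxes : List (List Int)) (points : List (Int × Int)) =>
        match points with
        | [] => boxes ++ [[]]
        | (x1, y1) :: t =>
            let s := fuseLoop t x1 x1 y1 y1
            boxes ++ [[s.1, s.2.2.1, s.2.1 - s.1, s.2.2.2 - s.2.2.1]])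
      = fun boxes points => boxes ++ [boxB points] from by
        funext boxes points
        match points with
        | [] => rfl
        | (x1, y1) :: t => rfl]
  rw [foldl_append_map]; rfl

theorem box_agree (points : List (Int × Int)) (h : points ≠ []) : boxA points = boxB points := by
  obtain ⟨⟨x1, y1⟩, t, rfl⟩ := List.exists_cons_of_ne_nil h
  simp only [boxA, boxB, List.map_cons, PySem.List.min?_id_cons, PySem.List.max?_id_cons,
    fuseLoop_eq, Option.getD_some, List.foldl_map]

-- ===== VERDICT (by name: the statement is the Claim_ definition above) =====
theorem compute_boxes_from_points_spec : Claim_equal_compute_boxes_from_points := by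
  intro vm _ hpre
  unfold Spec_compute_boxes_from_points
  rw [A_as_map, B_as_map]
  exact List.map_congr_left (fun p hp => box_agree p (hpre p hp))
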